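-- pv_equiv track=rewrite | github.com/lucia-pezzetti/Complex_Networks | Project/src/percolation_basefunctions.py | computing_product_degree
-- ===== SOURCE A (Python) =====
-- def computing_product_degree(multiplex_structure,N):
--     """
--     Compute the product of the degrees of each layer and return it as a dictionary nodeID:Product degrees
--     :param file: dictionary of dictionaries containing the multiplex networks, the number of nodes N
--     :return: dictionary containing the product of the degrees of each layers, format: nodeID:Product degrees
--     """
--     total_nodes=[i for i in range(0,N)]
--     total_degree = dict.fromkeys(total_nodes, 0)
--     for layer_ID in multiplex_structure:
--         for nodes in multiplex_structure[layer_ID]: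
--             if total_degree[nodes] == 0:
--                 total_degree[nodes] = len(multiplex_structure[layer_ID][nodes])
--             else:
--                 total_degree[nodes]*=len(multiplex_structure[layer_ID][nodes])
--     return(total_degree)
-- ===== SOURCE B (Python) =====
-- def computing_product_degree(multiplex_structure, N):
--     # Gather pass: node -> list of its per-layer degrees, layers in order.
--     degs = {}
--     for layer in multiplex_structure.values():
--         for node, adjacency in layer.items():
--             degs.setdefault(node, []).append(len(adjacency))
--     # Reduce pass: fold each node's degree list with the reset-on-zero rule.
--     result = {}
--     for i in range(N):
--         acc = 0
--         for d in degs.get(i, []):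
--             acc = d if acc == 0 else acc * d
--         result[i] = acc
--     return result
-- ===== Notes on version B (the rewrite author's own statement) =====
-- stated objective: alternative
-- what changed: A updates one running product dict inline inside the nested layer/node loop; B is two differently-shaped passes: a gather pass building node -> list of per-layer degrees, then a reduce pass folding each list with the same reset-on-zero rule over nodes 0..N-1.
import Mathlib
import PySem

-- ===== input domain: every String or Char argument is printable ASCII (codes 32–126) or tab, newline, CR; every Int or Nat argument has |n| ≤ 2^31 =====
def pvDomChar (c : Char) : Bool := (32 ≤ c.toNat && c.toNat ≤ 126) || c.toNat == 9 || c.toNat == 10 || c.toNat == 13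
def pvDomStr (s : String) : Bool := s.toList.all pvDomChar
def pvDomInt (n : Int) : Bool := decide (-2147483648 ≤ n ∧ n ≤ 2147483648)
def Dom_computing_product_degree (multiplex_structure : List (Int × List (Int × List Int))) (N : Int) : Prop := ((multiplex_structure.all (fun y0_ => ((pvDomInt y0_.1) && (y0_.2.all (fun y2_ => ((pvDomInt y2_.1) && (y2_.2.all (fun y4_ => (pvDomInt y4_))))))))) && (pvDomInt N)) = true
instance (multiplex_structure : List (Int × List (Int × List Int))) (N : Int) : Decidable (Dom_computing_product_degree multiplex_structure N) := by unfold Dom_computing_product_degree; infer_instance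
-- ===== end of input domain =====

-- B replaces A's single inline accumulating loop by two differently-shaped passes (gather each
-- node's per-layer degree list, then reduce each list); objective: alternative decomposition.

-- ===== PORT A =====
def computing_product_degree (multiplex_structure : List (Int × List (Int × List Int))) (N : Int) : List (Int × Int) :=
  -- total_degree = dict.fromkeys([i for i in range(0, N)], 0)
  let total0 : PySem.Dict Int Int :=
    PySem.Dict.ofList ((PySem.List.pyRange 0 N 1).map (fun i => (i, (0 : Int))))
  -- for layer_ID in multiplex_structure: for nodes in multiplex_structure[layer_ID]: …
  -- under Pre_ both key levels are unique, so iterating the association list's pairs is exactly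
  -- the Python dict iteration + lookup, and total_degree[nodes] (which Pre_ keeps in the dict,
  -- else Python raises KeyError) is getD.
  let total := multiplex_structure.foldl (fun d layer =>
    layer.2.foldl (fun d p =>
      if d.getD p.1 0 = 0 then d.insert p.1 (p.2.length : Int)
      else d.insert p.1 (d.getD p.1 0 * (p.2.length : Int))) d) total0
  total.items

-- ===== PORT B =====
def computing_product_degree_alt (multiplex_structure : List (Int × List (Int × List Int))) (N : Int) : List (Int × Int) :=
  -- gather pass: degs.setdefault(node, []).append(len(adjacency)) = modify with default []
  let degs : PySem.Dict Int (List Int) := multiplex_structure.foldl (fun d layer =>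
    layer.2.foldl (fun d p => d.modify p.1 [] (· ++ [(p.2.length : Int)])) d) PySem.Dict.empty
  -- reduce pass: result[i] = fold of degs.get(i, []) with the reset-on-zero rule
  (PySem.List.pyRange 0 N 1).map (fun i =>
    (i, (degs.getD i []).foldl (fun acc dg => if acc = 0 then dg else acc * dg) (0 : Int)))

-- ===== PRECONDITION & SPEC =====
-- Pre_ states the dict-representation invariant (association lists standing for Python dicts
-- have unique keys at both levels) and excludes exactly the inputs where A raises KeyError:
-- a node key outside range(0, N).
def Pre_computing_product_degree (multiplex_structure : List (Int × List (Int × List Int))) (N : Int) : Prop :=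
  (multiplex_structure.map Prod.fst).Nodup ∧
  ∀ l ∈ multiplex_structure, (l.2.map Prod.fst).Nodup ∧ ∀ p ∈ l.2, 0 ≤ p.1 ∧ p.1 < N
instance (multiplex_structure : List (Int × List (Int × List Int))) (N : Int) : Decidable (Pre_computing_product_degree multiplex_structure N) := by unfold Pre_computing_product_degree; infer_instance

def pvWitness_computing_product_degree : (List (Int × List (Int × List Int))) × Int :=
  ([(0, [(0, [1, 2]), (1, [])]), (1, [(1, [0])])], 2)

def Spec_computing_product_degree (multiplex_structure : List (Int × List (Int × List Int))) (N : Int) (out : List (Int × Int)) : Prop := out = computing_product_degree_alt multiplex_structure N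
instance (multiplex_structure : List (Int × List (Int × List Int))) (N : Int) (out : List (Int × Int)) : Decidable (Spec_computing_product_degree multiplex_structure N out) := by unfold Spec_computing_product_degree; infer_instance

-- ===== CLAIM (what is proved, stated in full; the proofs are below) =====
def Claim_equal_computing_product_degree : Prop := ∀ (multiplex_structure : List (Int × List (Int × List Int))) (N : Int), Dom_computing_product_degree multiplex_structure N → Pre_computing_product_degree multiplex_structure N → Spec_computing_product_degree multiplex_structure N (computing_product_degree multiplex_structure N)

-- ===== LEMMAS AND PROOFS =====

-- the (node, degree) pairs both nested loops visit, in visiting order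
def pvQs (multiplex_structure : List (Int × List (Int × List Int))) : List (Int × Int) :=
  multiplex_structure.flatMap (fun l => l.2.map (fun p => (p.1, (p.2.length : Int))))

-- A's loop body on one (node, degree) pair
def pvStepA (d : PySem.Dict Int Int) (q : Int × Int) : PySem.Dict Int Int :=
  if d.getD q.1 0 = 0 then d.insert q.1 q.2 else d.insert q.1 (d.getD q.1 0 * q.2)

-- the reset-on-zero reduction
def pvRed (acc dg : Int) : Int := if acc = 0 then dg else acc * dg

lemma pvStepA_eq_insert (d : PySem.Dict Int Int) (q : Int × Int) :
    pvStepA d q = d.insert q.1 (pvRed (d.getD q.1 0) q.2) := by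
  by_cases h : d.getD q.1 0 = 0 <;> simp [pvStepA, pvRed, h]

lemma pvA_flat (multiplex_structure : List (Int × List (Int × List Int))) (d : PySem.Dict Int Int) :
    multiplex_structure.foldl (fun d layer =>
      layer.2.foldl (fun d p =>
        if d.getD p.1 0 = 0 then d.insert p.1 (p.2.length : Int)
        else d.insert p.1 (d.getD p.1 0 * (p.2.length : Int))) d) d
    = (pvQs multiplex_structure).foldl pvStepA d := by
  simp [pvQs, List.foldl_flatMap, List.foldl_map, pvStepA]

lemma pvB_flat (multiplex_structure : List (Int × List (Int × List Int))) (d : PySem.Dict Int (List Int)) :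
    multiplex_structure.foldl (fun d layer =>
      layer.2.foldl (fun d p => d.modify p.1 [] (· ++ [(p.2.length : Int)])) d) d
    = (pvQs multiplex_structure).foldl (fun d q => d.modify q.1 [] (· ++ [q.2])) d := by
  simp [pvQs, List.foldl_flatMap, List.foldl_map]

lemma pvGetD_foldl_stepA (qs : List (Int × Int)) :
    ∀ (d : PySem.Dict Int Int) (i : Int),
      (qs.foldl pvStepA d).getD i 0
        = ((qs.filter (fun q => q.1 == i)).map Prod.snd).foldl pvRed (d.getD i 0) := by
  induction qs with
  | nil => intro d i; rfl
  | cons q qs ih =>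
    intro d i
    simp only [List.foldl_cons, ih, pvStepA_eq_insert, List.filter_cons]
    by_cases hq : q.1 = i
    · subst hq
      simp
    · simp [PySem.Dict.getD_insert, hq, Ne.symm hq]

lemma pvKeys_foldl_stepA (qs : List (Int × Int)) (d : PySem.Dict Int Int)
    (h : ∀ q ∈ qs, q.1 ∈ d.keys) :
    (qs.foldl pvStepA d).keys = d.keys := by
  have he : qs.foldl pvStepA d
      = qs.foldl (fun d q => d.insert q.1 (pvRed (d.getD q.1 0) q.2)) d :=
    PySem.List.foldl_congr_mem qs _ _ d (fun acc x _ => pvStepA_eq_insert acc x)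
  rw [he, PySem.Dict.keys_foldl_insert_key qs Prod.fst _ d,
      PySem.Set.update_eq_append_filter]
  have hfil : (PySem.Set.ofList (qs.map Prod.fst)).filter (fun y => !PySem.Set.contains d.keys y) = [] := by
    rw [List.filter_eq_nil_iff]
    intro y hy
    have := (PySem.Set.mem_ofList _ _).mp hy
    obtain ⟨q, hq, rfl⟩ := List.mem_map.mp this
    simp [h q hq]
  rw [hfil, List.append_nil]

lemma pvNodup_keys_foldl_stepA (qs : List (Int × Int)) (d : PySem.Dict Int Int)
    (h : d.keys.Nodup) : (qs.foldl pvStepA d).keys.Nodup := by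
  have he : qs.foldl pvStepA d
      = qs.foldl (fun d q => d.insert q.1 (pvRed (d.getD q.1 0) q.2)) d :=
    PySem.List.foldl_congr_mem qs _ _ d (fun acc x _ => pvStepA_eq_insert acc x)
  rw [he]
  exact PySem.Dict.nodup_keys_foldl_insert_key qs Prod.fst _ d h

-- facts about total_degree's initial value dict.fromkeys(range(0, N), 0)
def pvTotal0 (N : Int) : PySem.Dict Int Int :=
  PySem.Dict.ofList ((PySem.List.pyRange 0 N 1).map (fun i => (i, (0 : Int))))

lemma pvTotal0_items (N : Int) :
    (pvTotal0 N).items = (PySem.List.pyRange 0 N 1).map (fun i => (i, (0 : Int))) := by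
  have h := PySem.Dict.items_foldl_insert_fresh
      ((PySem.List.pyRange 0 N 1).map (fun i => (i, (0 : Int)))) Prod.fst Prod.snd PySem.Dict.empty
      (by intro a _; simp) (by simp [List.map_map, Function.comp_def, PySem.List.nodup_pyRange_one])
  simpa [pvTotal0, PySem.Dict.ofList, PySem.Dict.update] using h

lemma pvTotal0_keys (N : Int) : (pvTotal0 N).keys = PySem.List.pyRange 0 N 1 := by
  simp [PySem.Dict.keys, pvTotal0_items, List.map_map, Function.comp_def]

lemma pvTotal0_getD (N i : Int) : (pvTotal0 N).getD i 0 = 0 := by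
  by_cases h : i ∈ (pvTotal0 N).keys
  · have hnd : (pvTotal0 N).keys.Nodup := by
      rw [pvTotal0_keys]; exact PySem.List.nodup_pyRange_one 0 N
    have hmem : (i, (0 : Int)) ∈ (pvTotal0 N).items := by
      rw [pvTotal0_items]
      rw [pvTotal0_keys] at h
      exact List.mem_map.mpr ⟨i, h, rfl⟩
    exact PySem.Dict.getD_of_mem_items _ hmem hnd 0
  · refine PySem.Dict.getD_of_not_contains _ 0 ?_
    rw [PySem.Dict.contains_eq_decide_mem_keys]
    simp [h]

-- ===== VERDICT (by name: the statement is the Claim_ definition above) =====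
theorem computing_product_degree_spec : Claim_equal_computing_product_degree := by
  intro ms N _ hpre
  unfold Spec_computing_product_degree computing_product_degree computing_product_degree_alt
  simp only [pvA_flat, pvB_flat]
  have hmem : ∀ q ∈ pvQs ms, q.1 ∈ (pvTotal0 N).keys := by
    intro q hq
    rw [pvTotal0_keys]
    obtain ⟨l, hl, hql⟩ := List.mem_flatMap.mp hq
    obtain ⟨p, hp, rfl⟩ := List.mem_map.mp hql
    have := (hpre.2 l hl).2 p hp
    exact (PySem.List.mem_pyRange_one).mpr ⟨this.1, this.2⟩
  have hnd : ((pvQs ms).foldl pvStepA (pvTotal0 N)).keys.Nodup := by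
    refine pvNodup_keys_foldl_stepA _ _ ?_
    rw [pvTotal0_keys]; exact PySem.List.nodup_pyRange_one 0 N
  rw [show PySem.Dict.ofList ((PySem.List.pyRange 0 N 1).map (fun i => (i, (0 : Int)))) = pvTotal0 N from rfl,
      PySem.Dict.items_eq_map_keys _ hnd 0, pvKeys_foldl_stepA _ _ hmem, pvTotal0_keys]
  refine List.map_congr_left ?_
  intro i _
  rw [pvGetD_foldl_stepA, pvTotal0_getD,
      PySem.Dict.getD_foldl_modify_append (pvQs ms) PySem.Dict.empty i]
  rfl
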